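-- pv_equiv track=rewrite | github.com/phoenixstrategyresearch/pegasus | PythonBackend/hermes_bridge/tools_builtin.py | _shell_tr
-- ===== SOURCE A (Python) =====
-- def _shell_tr(args, cwd, stdin=""):
--     """Emulate tr for character translation/deletion."""
--     delete = "-d" in args
--     squeeze = "-s" in args
--     sets = [a for a in args if not a.startswith("-")]
--     if not stdin:
--         return "tr: requires piped input"
--     if delete and sets:
--         chars_to_delete = sets[0].strip("'\"")
--         result = stdin
--         for c in chars_to_delete:
--             result = result.replace(c, "")
--         return result
--     if len(sets) >= 2:
--         set1 = sets[0].strip("'\"")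
--         set2 = sets[1].strip("'\"")
--         # Handle character classes
--         if set1 == "[:upper:]": set1 = "ABCDEFGHIJKLMNOPQRSTUVWXYZ"
--         if set1 == "[:lower:]": set1 = "abcdefghijklmnopqrstuvwxyz"
--         if set2 == "[:upper:]": set2 = "ABCDEFGHIJKLMNOPQRSTUVWXYZ"
--         if set2 == "[:lower:]": set2 = "abcdefghijklmnopqrstuvwxyz"
--         table = str.maketrans(set1[:len(set2)], set2[:len(set1)])
--         result = stdin.translate(table)
--         if squeeze:
--             for c in set2:
--                 while c + c in result:
--                     result = result.replace(c + c, c)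
--         return result
--     return stdin
-- ===== SOURCE B (Python) =====
-- def _shell_tr(args, cwd, stdin=""):
--     """tr emulation: set-based single-pass delete, fused translate+squeeze pass."""
--     if not stdin:
--         return "tr: requires piped input"
--     sets = [a for a in args if not a.startswith("-")]
--     if "-d" in args and sets:
--         dset = set(sets[0].strip("'\""))
--         return "".join(ch for ch in stdin if ch not in dset)
--     if len(sets) < 2:
--         return stdin
--
--     def expand(s):
--         s = s.strip("'\"")
--         if s == "[:upper:]":
--             return "ABCDEFGHIJKLMNOPQRSTUVWXYZ"
--         if s == "[:lower:]":
--             return "abcdefghijklmnopqrstuvwxyz"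
--         return s
--
--     set1, set2 = expand(sets[0]), expand(sets[1])
--     table = dict(zip(set1, set2))
--     out = []
--     if "-s" in args:
--         sq = set(set2)
--         for ch in stdin:
--             ch = table.get(ch, ch)
--             if out and out[-1] == ch and ch in sq:
--                 continue
--             out.append(ch)
--     else:
--         for ch in stdin:
--             out.append(table.get(ch, ch))
--     return "".join(out)
-- ===== Notes on version B (the rewrite author's own statement) =====
-- stated objective: alternative
-- what changed: Delete becomes a single filter pass against a character set instead of one full-string replace per deleted character, and squeeze becomes one fused translate+run-collapse pass instead of A's repeated `while c+c in result: replace` loop per squeeze character.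
import Mathlib
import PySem

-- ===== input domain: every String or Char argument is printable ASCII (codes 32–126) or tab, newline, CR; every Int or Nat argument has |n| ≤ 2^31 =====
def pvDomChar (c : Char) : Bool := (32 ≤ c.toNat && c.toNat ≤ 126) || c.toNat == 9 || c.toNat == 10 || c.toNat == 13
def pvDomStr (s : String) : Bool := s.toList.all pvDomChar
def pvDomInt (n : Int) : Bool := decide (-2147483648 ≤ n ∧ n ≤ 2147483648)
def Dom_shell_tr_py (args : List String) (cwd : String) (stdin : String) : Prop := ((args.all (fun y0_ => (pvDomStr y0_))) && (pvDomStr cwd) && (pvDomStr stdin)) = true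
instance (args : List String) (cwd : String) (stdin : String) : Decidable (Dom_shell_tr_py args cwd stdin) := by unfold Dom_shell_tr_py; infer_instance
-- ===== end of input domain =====

-- B re-implements tr differently: delete as one filter over a character set, and squeeze as
-- one fused translate+run-collapse pass instead of A's per-character replace loops.
-- Proved to return the same string on every input (both are total).

-- ===== PORT A =====
-- spec function for the termination proof of A's `while c+c in result` loop:
-- one left-to-right pass of result.replace(c+c, c)
def pvRep (c : Char) : List Char → List Char
  | x :: y :: t => if x = c ∧ y = c then c :: pvRep c t else x :: pvRep c (y :: t)
  | l => l

theorem pvRep_go (c : Char) : ∀ (fuel : Nat) (l acc : List Char), l.length ≤ fuel →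
    PySem.Chars.replace.go [c, c] [c] fuel l acc = acc.reverse ++ pvRep c l := by
  intro fuel
  induction fuel with
  | zero =>
    intro l acc h
    have : l = [] := by cases l <;> simp_all
    subst this
    simp [PySem.Chars.replace.go, pvRep]
  | succ n ih =>
    intro l acc h
    match l with
    | [] => simp [PySem.Chars.replace.go, pvRep]
    | [x] =>
      rw [PySem.Chars.replace.go]
      have hpre : [c, c].isPrefixOf [x] = false := by simp [List.isPrefixOf]
      rw [hpre]
      simp only [Bool.false_eq_true, if_false]
      rw [ih [] (x :: acc) (by simp)]
      simp [pvRep]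
    | x :: y :: t =>
      rw [PySem.Chars.replace.go]
      by_cases hxy : x = c ∧ y = c
      · rw [hxy.1, hxy.2]
        have hpre : [c, c].isPrefixOf (c :: c :: t) = true := by simp [List.isPrefixOf]
        rw [hpre]
        simp only [if_true]
        rw [show List.drop [c,c].length (c :: c :: t) = t by simp]
        rw [ih t ([c].reverse ++ acc) (by simp at h ⊢; omega)]
        simp [pvRep]
      · have hpre : [c, c].isPrefixOf (x :: y :: t) = false := by
          simp [List.isPrefixOf]
          intro h1 h2; exact hxy ⟨h1.symm, h2.symm⟩
        rw [hpre]
        simp only [Bool.false_eq_true, if_false]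
        rw [ih (y :: t) (x :: acc) (by simp at h ⊢; omega)]
        simp [pvRep, hxy]

theorem replace_cc (c : Char) (s : List Char) :
    PySem.Chars.replace s [c, c] [c] = pvRep c s := by
  rw [PySem.Chars.replace]
  simp only [List.isEmpty_cons, Bool.false_eq_true, if_false]
  rw [pvRep_go c s.length s [] (le_refl _)]
  simp

theorem pvRep_length_le (c : Char) (l : List Char) : (pvRep c l).length ≤ l.length := by
  induction l using pvRep.induct c with
  | case1 x y t h ih => rw [pvRep, if_pos h]; simp; omega
  | case2 x y t h ih => rw [pvRep, if_neg h]; simp at ih ⊢; omega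
  | case3 l h =>
    cases l with
    | nil => simp [pvRep]
    | cons a l' =>
      cases l' with
      | nil => simp [pvRep]
      | cons b l'' => exact absurd rfl (fun hh => h a b l'' hh)

theorem infix_cc_tail (c x y : Char) (t : List Char) (h : [c, c] <:+: x :: y :: t)
    (hxy : ¬(x = c ∧ y = c)) : [c, c] <:+: y :: t := by
  obtain ⟨s, u, hs⟩ := h
  match s with
  | [] => simp at hs; exact absurd ⟨hs.1.symm, hs.2.1.symm⟩ hxy
  | a :: s' =>
    simp only [List.cons_append, List.cons.injEq] at hs
    exact ⟨s', u, hs.2⟩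

theorem pvRep_length_lt (c : Char) (l : List Char) (h : [c, c] <:+: l) :
    (pvRep c l).length < l.length := by
  induction l using pvRep.induct c with
  | case1 x y t hxy ih =>
    rw [pvRep, if_pos hxy]
    have := pvRep_length_le c t
    simp at this ⊢; omega
  | case2 x y t hxy ih =>
    rw [pvRep, if_neg hxy]
    have := ih (infix_cc_tail c x y t h hxy)
    simp at this ⊢; omega
  | case3 l hl =>
    exfalso
    cases l with
    | nil => obtain ⟨s, u, hs⟩ := h; simp at hs
    | cons a l' =>
      cases l' with
      | nil =>
        obtain ⟨s, u, hs⟩ := h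
        have := congrArg List.length hs; simp at this; omega
      | cons b l'' => exact hl a b l'' rfl

-- while c + c in result: result = result.replace(c + c, c)
def trWhile (c : Char) (s : List Char) : List Char :=
  if h : PySem.Chars.isIn [c, c] s then trWhile c (PySem.Chars.replace s [c, c] [c]) else s
termination_by s.length
decreasing_by
  rw [replace_cc]
  exact pvRep_length_lt c s ((PySem.Chars.isIn_iff_infix _ _).mp h)

-- literal transliteration of A
def shell_tr_py (args : List String) (cwd : String) (stdin : String) : String :=
  let delete := args.contains "-d"
  let squeeze := args.contains "-s"
  let sets := args.filter (fun a => !(PySem.Str.startswith a "-"))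
  if stdin = "" then "tr: requires piped input"
  else if delete ∧ sets ≠ [] then
    let chars_to_delete := PySem.Chars.stripChars (sets.headD "").toList ['\'', '"']
    let result := chars_to_delete.foldl (fun r c => PySem.Chars.replace r [c] []) stdin.toList
    String.ofList result
  else if 2 ≤ sets.length then
    let set1 := PySem.Chars.stripChars (sets.headD "").toList ['\'', '"']
    let set2 := PySem.Chars.stripChars (sets.getD 1 "").toList ['\'', '"']
    let set1 := if set1 = "[:upper:]".toList then "ABCDEFGHIJKLMNOPQRSTUVWXYZ".toList else set1
    let set1 := if set1 = "[:lower:]".toList then "abcdefghijklmnopqrstuvwxyz".toList else set1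
    let set2 := if set2 = "[:upper:]".toList then "ABCDEFGHIJKLMNOPQRSTUVWXYZ".toList else set2
    let set2 := if set2 = "[:lower:]".toList then "abcdefghijklmnopqrstuvwxyz".toList else set2
    let table := (List.zip (PySem.List.slice set1 none (some (set2.length : Int)))
        (PySem.List.slice set2 none (some (set1.length : Int)))).foldl
        (fun d p => d.insert p.1 p.2) PySem.Dict.empty
    let result := stdin.toList.map (fun ch => table.getD ch ch)
    let result := if squeeze then set2.foldl (fun r c => trWhile c r) result else result
    String.ofList result
  else stdin

-- ===== PORT B =====
def pvExpand (s : String) : List Char :=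
  let s := PySem.Chars.stripChars s.toList ['\'', '"']
  if s = "[:upper:]".toList then "ABCDEFGHIJKLMNOPQRSTUVWXYZ".toList
  else if s = "[:lower:]".toList then "abcdefghijklmnopqrstuvwxyz".toList
  else s

-- fused translate + squeeze pass of Source B (out is the accumulator list, built in reverse)
def pvFused (t : PySem.Dict Char Char) (sq : PySem.Set Char) :
    List Char → List Char → List Char
  | [], out => out.reverse
  | ch :: rest, out =>
    let ch' := t.getD ch ch
    if out.head? = some ch' ∧ PySem.Set.contains sq ch' then pvFused t sq rest out
    else pvFused t sq rest (ch' :: out)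

def shell_tr_py_alt (args : List String) (cwd : String) (stdin : String) : String :=
  if stdin = "" then "tr: requires piped input"
  else
    let sets := args.filter (fun a => !(PySem.Str.startswith a "-"))
    if args.contains "-d" ∧ sets ≠ [] then
      let dset := PySem.Set.ofList (PySem.Chars.stripChars (sets.headD "").toList ['\'', '"'])
      String.ofList (stdin.toList.filter (fun ch => !(PySem.Set.contains dset ch)))
    else if sets.length < 2 then stdin
    else
      let set1 := pvExpand (sets.headD "")
      let set2 := pvExpand (sets.getD 1 "")
      let table := PySem.Dict.ofList (List.zip set1 set2)
      if args.contains "-s" then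
        String.ofList (pvFused table (PySem.Set.ofList set2) stdin.toList [])
      else
        String.ofList (stdin.toList.map (fun ch => table.getD ch ch))

-- ===== PRECONDITION & SPEC =====
def Spec_shell_tr_py (args : List String) (cwd : String) (stdin : String) (out : String) : Prop := out = shell_tr_py_alt args cwd stdin
instance (args : List String) (cwd : String) (stdin : String) (out : String) : Decidable (Spec_shell_tr_py args cwd stdin out) := by unfold Spec_shell_tr_py; infer_instance

-- ===== CLAIM (what is proved, stated in full; the proofs are below) =====
def Claim_equal_shell_tr_py : Prop := ∀ (args : List String) (cwd : String) (stdin : String), Dom_shell_tr_py args cwd stdin → Spec_shell_tr_py args cwd stdin (shell_tr_py args cwd stdin)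

-- ===== LEMMAS AND PROOFS =====

-- run-collapse with an explicit previous character: drops x when prev = x and x ∈ cs
def pvCol (cs : List Char) : Option Char → List Char → List Char
  | _, [] => []
  | p, x :: t => if p = some x ∧ cs.contains x then pvCol cs p t else x :: pvCol cs (some x) t

theorem pvCol_nil (p : Option Char) (s : List Char) : pvCol [] p s = s := by
  induction s generalizing p with
  | nil => simp [pvCol]
  | cons x t ih => simp [pvCol, ih]

theorem pvCol_cons_pos (cs : List Char) (p : Option Char) (x : Char) (t : List Char)
    (h : p = some x ∧ cs.contains x) : pvCol cs p (x :: t) = pvCol cs p t := by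
  rw [pvCol, if_pos h]

theorem pvCol_cons_neg (cs : List Char) (p : Option Char) (x : Char) (t : List Char)
    (h : ¬(p = some x ∧ cs.contains x)) : pvCol cs p (x :: t) = x :: pvCol cs (some x) t := by
  rw [pvCol, if_neg h]

theorem pvCol_congr (cs cs' : List Char) (h : ∀ x, cs.contains x = cs'.contains x)
    (p : Option Char) (s : List Char) : pvCol cs p s = pvCol cs' p s := by
  induction s generalizing p with
  | nil => simp [pvCol]
  | cons x t ih => simp only [pvCol, h x, ih]

theorem pvCol_comp (P Q : List Char) (s : List Char) : ∀ p,
    pvCol P p (pvCol Q p s) = pvCol (Q ++ P) p s := by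
  induction s with
  | nil => intro p; simp [pvCol]
  | cons x t ih =>
    intro p
    by_cases hq : p = some x ∧ Q.contains x = true
    · rw [pvCol_cons_pos _ _ _ _ hq,
        pvCol_cons_pos _ _ _ _ ⟨hq.1, by
          simp only [List.contains_iff_mem, List.mem_append]
          exact Or.inl (List.contains_iff_mem.mp hq.2)⟩, ih]
    · by_cases hp : p = some x ∧ P.contains x = true
      · have hq2 : ¬ Q.contains x = true := fun hc => hq ⟨hp.1, hc⟩
        rw [hp.1] at hq ⊢
        rw [pvCol_cons_neg _ _ _ _ (fun hc => hq2 hc.2),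
          pvCol_cons_pos _ _ _ _ ⟨rfl, hp.2⟩, ih,
          pvCol_cons_pos _ _ _ _ ⟨rfl, by
            simp only [List.contains_iff_mem, List.mem_append]
            exact Or.inr (List.contains_iff_mem.mp hp.2)⟩]
      · rw [pvCol_cons_neg _ _ _ _ hq, pvCol_cons_neg _ _ _ _ hp,
          pvCol_cons_neg _ _ _ _ (by
            rintro ⟨h1, h2⟩
            simp only [List.contains_iff_mem, List.mem_append] at h2
            rcases h2 with h2 | h2
            · exact hq ⟨h1, List.contains_iff_mem.mpr h2⟩
            · exact hp ⟨h1, List.contains_iff_mem.mpr h2⟩), ih]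

theorem pvCol_rep (c : Char) (s : List Char) : ∀ p,
    pvCol [c] p (pvRep c s) = pvCol [c] p s := by
  induction s using pvRep.induct c with
  | case1 x y t hxy ih =>
    intro p
    rw [pvRep, if_pos hxy, hxy.1, hxy.2]
    by_cases hp : p = some c
    · have hcond : p = some c ∧ ([c].contains c) = true := ⟨hp, by simp⟩
      rw [pvCol_cons_pos _ _ _ _ hcond, ih p, pvCol_cons_pos _ _ _ _ hcond,
        pvCol_cons_pos _ _ _ _ hcond]
    · have hcond : ¬(p = some c ∧ ([c].contains c) = true) := fun hc => hp hc.1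
      rw [pvCol_cons_neg _ _ _ _ hcond, ih (some c), pvCol_cons_neg _ _ _ _ hcond,
        pvCol_cons_pos _ _ _ _ ⟨rfl, by simp⟩]
  | case2 x y t hxy ih =>
    intro p
    rw [pvRep, if_neg hxy]
    by_cases hp : p = some x ∧ x = c
    · have hcond : p = some x ∧ ([c].contains x) = true := ⟨hp.1, by simp [hp.2]⟩
      rw [pvCol_cons_pos _ _ _ _ hcond, ih p, pvCol_cons_pos _ _ _ _ hcond]
    · have hcond : ¬(p = some x ∧ ([c].contains x) = true) := by
        rintro ⟨h1, h2⟩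
        simp only [List.contains_iff_mem, List.mem_singleton] at h2
        exact hp ⟨h1, h2⟩
      rw [pvCol_cons_neg _ _ _ _ hcond, ih (some x), pvCol_cons_neg _ _ _ _ hcond]
  | case3 l h =>
    intro p
    cases l with
    | nil => rfl
    | cons a l' =>
      cases l' with
      | nil => rfl
      | cons b l'' => exact absurd rfl (fun hh => h a b l'' hh)

theorem pvCol_id_tail (c x : Char) (t : List Char) (h : ¬ [c, c] <:+: x :: t) :
    pvCol [c] (some x) t = t := by
  induction t generalizing x with
  | nil => rfl
  | cons y t' ih =>
    have hxy : ¬(x = c ∧ y = c) := by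
      intro ⟨h1, h2⟩; subst h1; subst h2
      exact h ⟨[], t', rfl⟩
    rw [pvCol_cons_neg _ _ _ _ (by
      rintro ⟨h1, h2⟩
      simp only [List.contains_iff_mem, List.mem_singleton] at h2
      subst h2
      exact hxy ⟨Option.some.inj h1, rfl⟩)]
    have ht : ¬ [c, c] <:+: y :: t' := by
      intro hc
      obtain ⟨u, v, hv⟩ := hc
      exact h ⟨x :: u, v, by simp [← hv]⟩
    rw [ih y ht]

theorem pvCol_id (c : Char) (s : List Char) (h : ¬ [c, c] <:+: s) :
    pvCol [c] none s = s := by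
  match s with
  | [] => rfl
  | x :: t =>
    rw [pvCol_cons_neg _ _ _ _ (by simp), pvCol_id_tail c x t h]

theorem trWhile_eq (c : Char) (s : List Char) : trWhile c s = pvCol [c] none s := by
  rw [trWhile]
  by_cases h : PySem.Chars.isIn [c, c] s = true
  · rw [dif_pos h, replace_cc]
    have := trWhile_eq c (pvRep c s)
    rw [this, pvCol_rep]
  · rw [dif_neg h]
    exact (pvCol_id c s ((PySem.Chars.isIn_eq_false_iff _ _).mp (by simpa using h))).symm
termination_by s.length
decreasing_by
  exact pvRep_length_lt c s ((PySem.Chars.isIn_iff_infix _ _).mp h)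

theorem foldl_trWhile (cs : List Char) : ∀ s : List Char,
    cs.foldl (fun r c => trWhile c r) s = pvCol cs none s := by
  induction cs with
  | nil => intro s; simp [pvCol_nil]
  | cons c cs ih =>
    intro s
    rw [List.foldl_cons, ih (trWhile c s), trWhile_eq, pvCol_comp]
    simp

theorem pvFused_eq (t : PySem.Dict Char Char) (sq : PySem.Set Char) (inp : List Char) :
    ∀ out : List Char,
    pvFused t sq inp out =
      out.reverse ++ pvCol sq out.head? (inp.map (fun ch => t.getD ch ch)) := by
  induction inp with
  | nil => intro out; simp [pvFused, pvCol]
  | cons ch rest ih =>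
    intro out
    rw [pvFused]
    simp only [List.map_cons]
    by_cases h : out.head? = some (t.getD ch ch) ∧ PySem.Set.contains sq (t.getD ch ch)
    · rw [if_pos h, ih out,
        pvCol_cons_pos _ _ _ _ ⟨h.1, by simpa [PySem.Set.contains] using h.2⟩]
    · rw [if_neg h, ih (t.getD ch ch :: out),
        pvCol_cons_neg _ _ _ _ (fun hc => h ⟨hc.1, by simpa [PySem.Set.contains] using hc.2⟩)]
      simp

-- single-character delete: result.replace(c, '') is a filter
theorem del_go (c : Char) : ∀ (fuel : Nat) (l acc : List Char), l.length ≤ fuel →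
    PySem.Chars.replace.go [c] [] fuel l acc = acc.reverse ++ l.filter (fun x => x != c) := by
  intro fuel
  induction fuel with
  | zero =>
    intro l acc h
    have : l = [] := by cases l <;> simp_all
    subst this
    simp [PySem.Chars.replace.go]
  | succ n ih =>
    intro l acc h
    match l with
    | [] => simp [PySem.Chars.replace.go]
    | x :: t =>
      rw [PySem.Chars.replace.go]
      by_cases hx : x = c
      · subst hx
        have hpre : [x].isPrefixOf (x :: t) = true := by simp [List.isPrefixOf]
        rw [hpre]
        simp only [if_true]
        rw [show List.drop [x].length (x :: t) = t by simp]
        rw [ih t ([].reverse ++ acc) (by simp at h; omega)]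
        simp
      · have hpre : [c].isPrefixOf (x :: t) = false := by
          simp [List.isPrefixOf]; exact fun h1 => hx h1.symm
        rw [hpre]
        simp only [Bool.false_eq_true, if_false]
        rw [ih t (x :: acc) (by simp at h; omega)]
        simp [hx]

theorem replace_single (c : Char) (s : List Char) :
    PySem.Chars.replace s [c] [] = s.filter (fun x => x != c) := by
  rw [PySem.Chars.replace]
  simp only [List.isEmpty_cons, Bool.false_eq_true, if_false]
  rw [del_go c s.length s [] (le_refl _)]
  simp

theorem foldl_delete (ds : List Char) : ∀ s : List Char,
    ds.foldl (fun r c => PySem.Chars.replace r [c] []) s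
      = s.filter (fun x => !ds.contains x) := by
  induction ds with
  | nil => intro s; simp
  | cons c ds ih =>
    intro s
    rw [List.foldl_cons, replace_single, ih, List.filter_filter]
    apply List.filter_congr
    intro x _
    by_cases hx : x = c <;> simp [hx]

theorem contains_ofList (l : List Char) (x : Char) :
    (PySem.Set.ofList l).contains x = l.contains x := by
  rw [Bool.eq_iff_iff]
  simp [PySem.Set.contains, PySem.Set.mem_ofList]

theorem zip_take_len (a : List Char) : ∀ b : List Char,
    List.zip (a.take b.length) (b.take a.length) = List.zip a b := by
  induction a with
  | nil => intro b; simp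
  | cons x a ih =>
    intro b
    match b with
    | [] => simp
    | y :: b => simp [List.zip_cons_cons, ih b]

-- B's expansion helper equals A's sequential reassignments (stated in A's zeta-expanded shape)
theorem pvExpand_eq (s : String) :
    (if (if PySem.Chars.stripChars s.toList ['\'', '"'] = "[:upper:]".toList
          then "ABCDEFGHIJKLMNOPQRSTUVWXYZ".toList
          else PySem.Chars.stripChars s.toList ['\'', '"']) = "[:lower:]".toList
       then "abcdefghijklmnopqrstuvwxyz".toList
       else (if PySem.Chars.stripChars s.toList ['\'', '"'] = "[:upper:]".toList
          then "ABCDEFGHIJKLMNOPQRSTUVWXYZ".toList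
          else PySem.Chars.stripChars s.toList ['\'', '"'])) = pvExpand s := by
  rw [pvExpand]
  by_cases h1 : PySem.Chars.stripChars s.toList ['\'', '"'] = "[:upper:]".toList
  · rw [if_pos h1, if_pos h1, if_neg (by decide)]
  · rw [if_neg h1, if_neg h1]

theorem shell_tr_py_spec' (args : List String) (cwd : String) (stdin : String) :
    shell_tr_py args cwd stdin = shell_tr_py_alt args cwd stdin := by
  rw [shell_tr_py, shell_tr_py_alt]
  by_cases h0 : stdin = ""
  · simp [h0]
  · simp only [if_neg h0]
    by_cases h1 : args.contains "-d" = true ∧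
        args.filter (fun a => !(PySem.Str.startswith a "-")) ≠ []
    · rw [if_pos h1, if_pos h1, foldl_delete]
      congr 1
      apply List.filter_congr
      intro x _
      rw [contains_ofList]
    · rw [if_neg h1, if_neg h1]
      by_cases h2 : 2 ≤ (args.filter (fun a => !(PySem.Str.startswith a "-"))).length
      · have h2' : ¬((args.filter (fun a => !(PySem.Str.startswith a "-"))).length < 2) := by
          omega
        rw [if_pos h2, if_neg h2']
        rw [pvExpand_eq, pvExpand_eq]
        have htab :
            (List.zip
              (PySem.List.slice (pvExpand ((args.filter (fun a => !(PySem.Str.startswith a "-"))).headD ""))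
                none (some ((pvExpand ((args.filter (fun a => !(PySem.Str.startswith a "-"))).getD 1 "")).length : Int)))
              (PySem.List.slice (pvExpand ((args.filter (fun a => !(PySem.Str.startswith a "-"))).getD 1 ""))
                none (some ((pvExpand ((args.filter (fun a => !(PySem.Str.startswith a "-"))).headD "")).length : Int)))).foldl
              (fun d p => d.insert p.1 p.2) PySem.Dict.empty
            = PySem.Dict.ofList
              (List.zip (pvExpand ((args.filter (fun a => !(PySem.Str.startswith a "-"))).headD ""))
                (pvExpand ((args.filter (fun a => !(PySem.Str.startswith a "-"))).getD 1 ""))) := by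
          rw [PySem.List.slice_to_natCast, PySem.List.slice_to_natCast, zip_take_len]
          rfl
        rw [htab]
        by_cases h3 : args.contains "-s" = true
        · rw [if_pos h3, if_pos h3, foldl_trWhile, pvFused_eq]
          simp only [List.reverse_nil, List.head?_nil, List.nil_append]
          rw [pvCol_congr _ _ (contains_ofList _)]
        · rw [if_neg h3, if_neg h3]
      · have h2' : (args.filter (fun a => !(PySem.Str.startswith a "-"))).length < 2 := by
          omega
        rw [if_neg h2, if_pos h2']

-- ===== VERDICT (by name: the statement is the Claim_ definition above) =====
theorem shell_tr_py_spec : Claim_equal_shell_tr_py := by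
  intro args cwd stdin _
  exact shell_tr_py_spec' args cwd stdin
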